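-- pv_equiv track=rewrite | github.com/xcy103/personal_python_algorithm_note | ZUO/贪心贪心！！！/90/AbsoluteValueAddToArray.py | len2
-- ===== SOURCE A (Python) =====
-- from math import gcd
-- from collections import Counter
--
-- def len2(arr):
--     max_val = 0
--     g = 0
--
--     # 找最大值 & 初始化gcd
--     for num in arr:
--         max_val = max(max_val, num)
--         if num != 0:
--             g = num
--
--     # 全是0
--     if g == 0:
--         return len(arr)
--
--     # 统计频率 + 计算整体gcd
--     cnts = Counter(arr)
--     for num in arr:
--         if num != 0:
--             g = gcd(g, num)
--
--     # 核心计算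
--     ans = max_val // g
--
--     max_cnt = 0
--     for key, cnt in cnts.items():
--         if key != 0:
--             ans += cnt - 1
--         max_cnt = max(max_cnt, cnt)
--
--     # 处理0
--     if 0 in cnts:
--         ans += cnts[0]
--     else:
--         if max_cnt > 1:
--             ans += 1
--
--     return ans
-- ===== SOURCE B (Python) =====
-- from math import gcd
--
--
-- def len2(arr):
--     s = sorted(arr)
--     g = 0
--     for x in s:
--         g = gcd(g, x)
--     if g == 0:
--         return len(s)
--     ans = max(s[-1], 0) // g
--     zeros = 0
--     any_dup = False
--     prev = None
--     for x in s:
--         if x == 0: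
--             zeros += 1
--         if x == prev:
--             any_dup = True
--             if x != 0:
--                 ans += 1
--         prev = x
--     if zeros:
--         ans += zeros
--     elif any_dup:
--         ans += 1
--     return ans
-- ===== Notes on version B (the rewrite author's own statement) =====
-- stated objective: alternative
-- what changed: B sorts the array once and replaces A's Counter/frequency-table bookkeeping by a single adjacent-duplicate scan over the sorted list: duplicate excess, zero count and the any-duplicate flag are read off neighbouring equal elements, and the maximum is the last element of the sorted list; no hash map or per-key loop exists in B.
import Mathlib
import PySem

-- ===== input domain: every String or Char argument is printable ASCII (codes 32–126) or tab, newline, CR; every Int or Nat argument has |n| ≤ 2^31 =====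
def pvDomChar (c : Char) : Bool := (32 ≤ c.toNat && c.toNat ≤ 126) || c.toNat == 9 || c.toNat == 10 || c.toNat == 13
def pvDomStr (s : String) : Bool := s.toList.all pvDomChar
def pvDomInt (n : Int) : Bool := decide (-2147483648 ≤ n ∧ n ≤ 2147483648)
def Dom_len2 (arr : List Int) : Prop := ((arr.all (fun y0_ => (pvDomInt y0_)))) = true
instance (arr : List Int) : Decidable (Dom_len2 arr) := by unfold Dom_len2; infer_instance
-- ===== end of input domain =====

-- B sorts the array once and replaces A's frequency table (Counter) by a single adjacent-duplicate
-- scan over the sorted list; same return value, a different data organisation (sorting vs hashing).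

-- ===== PORT A =====
-- math.gcd(a, b) = gcd(|a|, |b|) ≥ 0; Int.gcd computes exactly that (exact port of math.gcd)
def len2 (arr : List Int) : Int :=
  -- for num in arr: max_val = max(max_val, num); if num != 0: g = num
  let p := arr.foldl (fun (p : Int × Int) num => (max p.1 num, if num ≠ 0 then num else p.2)) (0, 0)
  let max_val := p.1
  let g0 := p.2
  if g0 = 0 then (arr.length : Int)
  else
    let cnts : PySem.Dict Int Int := PySem.Dict.counter arr
    -- for num in arr: if num != 0: g = gcd(g, num)
    let g := arr.foldl (fun g num => if num ≠ 0 then ((Int.gcd g num : Nat) : Int) else g) g0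
    let ans := PySem.Int.floordiv max_val g
    -- for key, cnt in cnts.items(): …
    let q := cnts.items.foldl
      (fun (q : Int × Int) kv => ((if kv.1 ≠ 0 then q.1 + (kv.2 - 1) else q.1), max q.2 kv.2)) (ans, 0)
    let ans1 := q.1
    let max_cnt := q.2
    if cnts.contains 0 then ans1 + cnts.getD 0 0
    else if max_cnt > 1 then ans1 + 1 else ans1

-- ===== PORT B =====
def len2_alt (arr : List Int) : Int :=
  let s := PySem.List.sorted arr (fun x => x) false
  -- for x in s: g = gcd(g, x)
  let g : Int := s.foldl (fun g x => ((Int.gcd g x : Nat) : Int)) 0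
  if g = 0 then (s.length : Int)
  else
    -- s ≠ [] here (g ≠ 0), so s[-1] is in range and pyGet? is some: .getD 0 is exact
    let ans0 : Int := PySem.Int.floordiv (max ((PySem.List.pyGet? s (-1)).getD 0) 0) g
    -- for x in s: zeros/any_dup/ans/prev updates; state = (zeros, ans, prev, any_dup)
    let st := s.foldl (fun (st : Int × Int × Option Int × Bool) (x : Int) =>
        ((if x = 0 then st.1 + 1 else st.1),
         (if some x = st.2.2.1 ∧ x ≠ 0 then st.2.1 + 1 else st.2.1),
         some x,
         (st.2.2.2 || decide (some x = st.2.2.1)))) (0, ans0, none, false)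
    if st.1 ≠ 0 then st.2.1 + st.1
    else if st.2.2.2 then st.2.1 + 1 else st.2.1

-- ===== PRECONDITION & SPEC =====
def Spec_len2 (arr : List Int) (out : Int) : Prop := out = len2_alt arr
instance (arr : List Int) (out : Int) : Decidable (Spec_len2 arr out) := by unfold Spec_len2; infer_instance

-- ===== CLAIM (what is proved, stated in full; the proofs are below) =====
def Claim_equal_len2 : Prop := ∀ (arr : List Int), Dom_len2 arr → Spec_len2 arr (len2 arr)

-- ===== LEMMAS AND PROOFS =====

-- the last-nonzero fold: from init i, result is i iff all elements are 0, and a nonzero result is an element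
theorem lastNZ_eq_init (arr : List Int) (i : Int) (h : ∀ x ∈ arr, x = 0) :
    arr.foldl (fun g x => if x ≠ 0 then x else g) i = i := by
  induction arr generalizing i with
  | nil => rfl
  | cons a t ih =>
    have ha : a = 0 := h a (List.mem_cons_self)
    simp only [List.foldl_cons]
    rw [if_neg (by simpa using ha)]
    exact ih i (fun x hx => h x (List.mem_cons_of_mem _ hx))

theorem lastNZ_of_exists (arr : List Int) (i : Int) (h : ∃ x ∈ arr, x ≠ 0) :
    arr.foldl (fun g x => if x ≠ 0 then x else g) i ∈ arr ∧
    arr.foldl (fun g x => if x ≠ 0 then x else g) i ≠ 0 := by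
  induction arr generalizing i with
  | nil => simp at h
  | cons a t ih =>
    simp only [List.foldl_cons]
    by_cases ht : ∃ x ∈ t, x ≠ 0
    · rcases ih (if a ≠ 0 then a else i) ht with ⟨hm, hz⟩
      exact ⟨List.mem_cons_of_mem _ hm, hz⟩
    · push_neg at ht
      have ha : a ≠ 0 := by
        rcases h with ⟨x, hx, hxne⟩
        rcases List.mem_cons.mp hx with h' | h'
        · exact h' ▸ hxne
        · exact absurd (ht x h') hxne
      rw [if_pos (by simpa using ha), lastNZ_eq_init t a ht]
      exact ⟨List.mem_cons_self, ha⟩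

-- the Nat gcd fold over |·| of the elements
def natG (arr : List Int) (n : Nat) : Nat := arr.foldl (fun n x => Nat.gcd n x.natAbs) n

theorem natG_cons (a : Int) (t : List Int) (n : Nat) :
    natG (a :: t) n = natG t (Nat.gcd n a.natAbs) := rfl

theorem natG_gcd_left (arr : List Int) (n m : Nat) :
    natG arr (Nat.gcd n m) = Nat.gcd n (natG arr m) := by
  induction arr generalizing m with
  | nil => rfl
  | cons a t ih =>
    simp only [natG, List.foldl_cons] at *
    rw [Nat.gcd_assoc, ih]

theorem natG_absorb (t : List Int) (m : Nat) : natG t m = Nat.gcd m (natG t 0) := by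
  conv_lhs => rw [← Nat.gcd_zero_right m]
  exact natG_gcd_left t m 0

theorem natG_dvd (arr : List Int) : ∀ x ∈ arr, natG arr 0 ∣ x.natAbs := by
  induction arr with
  | nil => simp
  | cons a t ih =>
    intro x hx
    rw [natG_cons, Nat.gcd_zero_left, natG_absorb]
    rcases List.mem_cons.mp hx with h | h
    · subst h; exact Nat.gcd_dvd_left _ _
    · exact dvd_trans (Nat.gcd_dvd_right _ _) (ih x h)

theorem natG_eq_zero_iff (arr : List Int) : natG arr 0 = 0 ↔ ∀ x ∈ arr, x = 0 := by
  induction arr with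
  | nil => simp [natG]
  | cons a t ih =>
    rw [natG_cons, Nat.gcd_zero_left, natG_absorb, Nat.gcd_eq_zero_iff]
    constructor
    · rintro ⟨h1, h2⟩ x hx
      rcases List.mem_cons.mp hx with h | h
      · subst h; omega
      · exact ih.mp h2 x h
    · intro h
      refine ⟨?_, ih.mpr (fun x hx => h x (List.mem_cons_of_mem _ hx))⟩
      have := h a List.mem_cons_self; omega

theorem natG_perm (l1 l2 : List Int) (h : l1.Perm l2) (n : Nat) : natG l1 n = natG l2 n :=
  @List.Perm.foldl_eq _ _ _ _ _
    ⟨fun a b c => by simp [Nat.gcd_assoc, Nat.gcd_comm b.natAbs]⟩ h n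

-- B's (and A's inner) Int gcd fold is the Nat fold, cast
theorem intG_eq_natG (arr : List Int) (n : Nat) :
    arr.foldl (fun g x => ((Int.gcd g x : Nat) : Int)) (n : Int) = (natG arr n : Int) := by
  induction arr generalizing n with
  | nil => rfl
  | cons a t ih =>
    simp only [List.foldl_cons, natG]
    rw [show Int.gcd (n : Int) a = Nat.gcd n a.natAbs from by simp [Int.gcd]]
    exact ih _

-- A's gcd loop (skip zeros, start at g0) also computes gcd(|g0|, gcd of the elements)
theorem aG_eq (arr : List Int) (g0 : Int) :
    arr.foldl (fun g num => if num ≠ 0 then ((Int.gcd g num : Nat) : Int) else g) g0 =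
      if ∀ x ∈ arr, x = 0 then g0 else (Nat.gcd g0.natAbs (natG arr 0) : Int) := by
  induction arr generalizing g0 with
  | nil => simp
  | cons a t ih =>
    simp only [List.foldl_cons]
    by_cases ha : a = 0
    · rw [if_neg (by simpa using ha), ih]
      subst ha
      rw [show natG ((0:Int) :: t) 0 = natG t 0 from by rw [natG_cons]; norm_num]
      by_cases hall : ∀ x ∈ t, x = 0 <;> simp [hall]
    · rw [if_pos (by simpa using ha), ih]
      have hcons : ¬ ∀ x ∈ (a :: t), x = 0 := fun h => ha (h a List.mem_cons_self)
      rw [if_neg hcons]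
      have hg : ((Int.gcd g0 a : Nat) : Int).natAbs = Nat.gcd g0.natAbs a.natAbs := by
        simp [Int.gcd]
      have hnat : natG (a :: t) 0 = Nat.gcd a.natAbs (natG t 0) := by
        rw [natG_cons, Nat.gcd_zero_left, natG_absorb]
      by_cases hall : ∀ x ∈ t, x = 0
      · rw [if_pos hall]
        have h0 : natG t 0 = 0 := (natG_eq_zero_iff t).mpr hall
        rw [hnat, h0, Nat.gcd_zero_right]
        simp [Int.gcd]
      · rw [if_neg hall, hg, hnat, Nat.gcd_assoc]

theorem sum_map_sub_one (l : List Int) (f : Int → Int) :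
    (l.map (fun k => f k - 1)).sum = (l.map f).sum - l.length := by
  induction l with
  | nil => simp
  | cons x t ih =>
    simp only [List.map_cons, List.sum_cons, List.length_cons, ih]
    push_cast; ring

theorem filter_nz_facts (l : List Int) (c : Int → Int) (hl : l.Nodup) :
    ((l.filter (fun k => decide (k ≠ 0))).map c).sum
        = (l.map c).sum - (if 0 ∈ l then c 0 else 0)
    ∧ ((l.filter (fun k => decide (k ≠ 0))).length : Int)
        = (l.length : Int) - (if 0 ∈ l then 1 else 0) := by
  induction l with
  | nil => simp
  | cons a t ih =>
    rcases ih (List.Nodup.of_cons hl) with ⟨ihs, ihl⟩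
    by_cases ha : a = 0
    · subst ha
      have h0t : (0:Int) ∉ t := (List.nodup_cons.mp hl).1
      have hfc : List.filter (fun k => decide (k ≠ 0)) ((0:Int) :: t)
          = List.filter (fun k => decide (k ≠ 0)) t := by simp
      rw [hfc]
      constructor
      · rw [ihs, if_neg h0t, if_pos (List.mem_cons_self), List.map_cons, List.sum_cons]
        ring
      · rw [ihl, if_neg h0t, if_pos (List.mem_cons_self), List.length_cons]
        push_cast; ring
    · have hm : ((0:Int) ∈ a :: t) ↔ ((0:Int) ∈ t) := by
        rw [List.mem_cons]
        constructor
        · rintro (h | h)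
          · exact absurd h.symm ha
          · exact h
        · exact Or.inr
      have hfc : List.filter (fun k => decide (k ≠ 0)) (a :: t)
          = a :: List.filter (fun k => decide (k ≠ 0)) t := by simp [ha]
      rw [hfc]
      constructor
      · simp only [List.map_cons, List.sum_cons, ihs, hm]
        split_ifs <;> ring
      · simp only [List.length_cons, hm]
        push_cast
        rw [ihl]
        split_ifs <;> ring

theorem setOfList_perm_dedup (arr : List Int) : (PySem.Set.ofList arr).Perm arr.dedup :=
  (List.perm_ext_iff_of_nodup (PySem.Set.nodup_ofList arr) (List.nodup_dedup arr)).mpr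
    (fun x => by simp [PySem.Set.mem_ofList, List.mem_dedup])

theorem sum_counts (arr : List Int) :
    ((PySem.Set.ofList arr).map (fun k => (arr.count k : Int))).sum = (arr.length : Int) := by
  rw [((setOfList_perm_dedup arr).map _).sum_eq]
  have hc : (arr.dedup.map (fun k => ((arr.count k : Nat) : Int))).sum
      = (((arr.dedup.map (fun k => arr.count k)).sum : Nat) : Int) := by
    rw [Nat.cast_list_sum, List.map_map]; rfl
  rw [hc, List.sum_map_count_dedup_eq_length]

theorem length_le_sum_int (l : List Int) (f : Int → Int) (h1 : ∀ x ∈ l, 1 ≤ f x) :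
    (l.length : Int) ≤ (l.map f).sum := by
  induction l with
  | nil => simp
  | cons a t ih =>
    have h := h1 a List.mem_cons_self
    have := ih (fun x hx => h1 x (List.mem_cons_of_mem _ hx))
    simp only [List.map_cons, List.sum_cons, List.length_cons]
    push_cast; omega

theorem exists_two_iff (l : List Int) (f : Int → Int) (h1 : ∀ x ∈ l, 1 ≤ f x) :
    (∃ x ∈ l, 2 ≤ f x) ↔ (l.length : Int) < (l.map f).sum := by
  induction l with
  | nil => simp
  | cons a t ih =>
    have h := h1 a List.mem_cons_self
    have ih' := ih (fun x hx => h1 x (List.mem_cons_of_mem _ hx))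
    have hle := length_le_sum_int t f (fun x hx => h1 x (List.mem_cons_of_mem _ hx))
    simp only [List.map_cons, List.sum_cons, List.length_cons, List.mem_cons]
    constructor
    · rintro ⟨x, hx | hx, h2⟩
      · subst hx; push_cast; omega
      · have := ih'.mp ⟨x, hx, h2⟩; push_cast; omega
    · intro hlt
      by_cases h2 : 2 ≤ f a
      · exact ⟨a, Or.inl rfl, h2⟩
      · have hfa : f a = 1 := by omega
        have : (t.length : Int) < (t.map f).sum := by push_cast at hlt ⊢; omega
        rcases ih'.mpr this with ⟨x, hx, h2⟩
        exact ⟨x, Or.inr hx, h2⟩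

theorem maxcnt_iff (l : List Int) (f : Int → Int) (h1 : ∀ x ∈ l, 1 ≤ f x) :
    (1 < l.foldl (fun acc k => max acc (f k)) 0) ↔ ((l.length : Int) < (l.map f).sum) := by
  rw [← exists_two_iff l f h1]
  constructor
  · intro h
    rw [← List.foldl_map] at h
    rcases PySem.List.foldl_max_mem (l.map f) 0 with h0 | hm
    · omega
    · rcases List.mem_map.mp hm with ⟨x, hx, hfx⟩
      exact ⟨x, hx, by omega⟩
  · rintro ⟨x, hx, h2⟩
    have := (PySem.List.le_foldl_max_int l f 0).2 x hx
    omega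

-- the common closed form both ports reduce to
def nf (arr : List Int) : Int :=
  if ∀ x ∈ arr, x = 0 then (arr.length : Int) else
    PySem.Int.floordiv (arr.foldl (fun a b => max a b) 0) ((natG arr 0 : Nat) : Int)
    + ((arr.length : Int) - (arr.count 0 : Int))
    - (((PySem.Set.ofList arr).length : Int) - (if (0:Int) ∈ arr then 1 else 0))
    + (if (0:Int) ∈ arr then ((arr.count 0 : Nat) : Int)
       else if ((PySem.Set.ofList arr).length : Int) < (arr.length : Int) then 1 else 0)

theorem len2_eq_nf (arr : List Int) : len2 arr = nf arr := by
  unfold len2 nf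
  dsimp only
  rw [PySem.List.foldl_prod_mk (f := fun a num => max a num)
      (g := fun g num => if num ≠ 0 then num else g)]
  by_cases hall : ∀ x ∈ arr, x = 0
  · rw [if_pos hall, lastNZ_eq_init arr 0 hall]
    simp
  · rw [if_neg hall]
    have hex : ∃ x ∈ arr, x ≠ 0 := by push_neg at hall; exact hall
    rcases lastNZ_of_exists arr 0 hex with ⟨hg0mem, hg0ne⟩
    rw [if_neg (by simpa using hg0ne)]
    -- A's gcd loop computes natG arr 0
    have hg : arr.foldl (fun g num => if num ≠ 0 then ((Int.gcd g num : Nat) : Int) else g)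
        (arr.foldl (fun g x => if x ≠ 0 then x else g) 0) = ((natG arr 0 : Nat) : Int) := by
      rw [aG_eq, if_neg hall]
      congr 1
      exact Nat.gcd_eq_right (natG_dvd arr _ hg0mem)
    rw [hg]
    -- the items loop
    rw [PySem.Dict.items_counter]
    rw [PySem.List.foldl_prod_mk
        (f := fun acc (kv : Int × Int) => if kv.1 ≠ 0 then acc + (kv.2 - 1) else acc)
        (g := fun acc (kv : Int × Int) => max acc kv.2)]
    rw [List.foldl_map, List.foldl_map]
    rw [PySem.List.foldl_ite_eq_foldl_filter (p := fun k => k ≠ 0), PySem.List.foldl_add]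
    rw [sum_map_sub_one]
    have hS := filter_nz_facts (PySem.Set.ofList arr) (fun k => ((arr.count k : Nat) : Int))
      (PySem.Set.nodup_ofList arr)
    have hsum := sum_counts arr
    have hmemS : ((0:Int) ∈ PySem.Set.ofList arr) ↔ (0:Int) ∈ arr := PySem.Set.mem_ofList arr 0
    have h1 : ∀ k ∈ PySem.Set.ofList arr, (1:Int) ≤ ((arr.count k : Nat) : Int) := by
      intro k hk
      have : k ∈ arr := (PySem.Set.mem_ofList arr k).mp hk
      have := List.count_pos_iff.mpr this
      omega
    have hmax := maxcnt_iff (PySem.Set.ofList arr) (fun k => ((arr.count k : Nat) : Int)) h1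
    rw [hsum] at hmax
    have hcontains : (PySem.Dict.counter arr).contains 0 = true ↔ (0:Int) ∈ arr := by
      simp [PySem.Dict.contains_counter]
    have hgetD : (PySem.Dict.counter arr).getD 0 0 = ((arr.count 0 : Nat) : Int) :=
      PySem.Dict.getD_counter arr 0
    rcases hS with ⟨hS1, hS2⟩
    simp only [hmemS] at hS1 hS2
    dsimp only at hS1 hS2 ⊢
    generalize hF : PySem.Int.floordiv (arr.foldl (fun a b => max a b) 0)
        ((natG arr 0 : Nat) : Int) = F
    by_cases hz : (0:Int) ∈ arr
    · simp only [if_pos (hcontains.mpr hz), hgetD, if_pos hz, hS1, hS2, hsum]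
      omega
    · simp only [if_neg (fun h => hz (hcontains.mp h)), if_neg hz, hS1, hS2, hsum]
      have hc0 : arr.count 0 = 0 := List.count_eq_zero.mpr hz
      by_cases hlt : ((PySem.Set.ofList arr).length : Int) < (arr.length : Int)
      · simp only [if_pos (hmax.mpr hlt), if_pos hlt, hc0]
        omega
      · simp only [if_neg (fun h => hlt (hmax.mp h)), if_neg hlt, hc0]
        omega

-- ===== B-side: the adjacency scan over the sorted list =====

-- specification functions for B's single loop (prev is the previous element, none at the start)
def adjNZ (p : Option Int) : List Int → Int
  | [] => 0
  | x :: t => (if some x = p ∧ x ≠ 0 then 1 else 0) + adjNZ (some x) t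

def adjAny (p : Option Int) : List Int → Bool
  | [] => false
  | x :: t => decide (some x = p) || adjAny (some x) t

def lastP (p : Option Int) : List Int → Option Int
  | [] => p
  | x :: t => lastP (some x) t

theorem scan_unroll (s : List Int) (st : Int × Int × Option Int × Bool) :
    s.foldl (fun (st : Int × Int × Option Int × Bool) (x : Int) =>
        ((if x = 0 then st.1 + 1 else st.1),
         (if some x = st.2.2.1 ∧ x ≠ 0 then st.2.1 + 1 else st.2.1),
         some x,
         (st.2.2.2 || decide (some x = st.2.2.1)))) st
      = (st.1 + (s.count 0 : Int), st.2.1 + adjNZ st.2.2.1 s,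
         lastP st.2.2.1 s, st.2.2.2 || adjAny st.2.2.1 s) := by
  induction s generalizing st with
  | nil => simp [adjNZ, adjAny, lastP]
  | cons x t ih =>
    simp only [List.foldl_cons, ih, adjNZ, adjAny, lastP]
    obtain ⟨z, a, p, d⟩ := st
    simp only
    refine Prod.ext ?_ (Prod.ext ?_ (Prod.ext rfl ?_))
    · dsimp only
      by_cases hx : x = 0 <;> simp [List.count_cons, hx] <;> push_cast <;> omega
    · dsimp only; split_ifs <;> omega
    · dsimp only; rw [Bool.or_assoc]

theorem adjNZ_none_cons (x : Int) (t : List Int) : adjNZ none (x :: t) = adjNZ (some x) t := by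
  simp [adjNZ]

theorem adjAny_none_cons (x : Int) (t : List Int) : adjAny none (x :: t) = adjAny (some x) t := by
  simp [adjAny]

theorem notMem_of_sorted_head (x y : Int) (t : List Int)
    (h : (x :: y :: t).Pairwise (fun a b => a ≤ b)) (hxy : x ≠ y) : x ∉ y :: t := by
  rcases List.pairwise_cons.mp h with ⟨hx, h2⟩
  rcases List.pairwise_cons.mp h2 with ⟨hy, _⟩
  intro hmem
  rcases List.mem_cons.mp hmem with h' | h'
  · exact hxy h'
  · have h1 := hx y (List.mem_cons_self)
    have h2 := hy x h'
    have := hx x hmem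
    omega

theorem adjNZ_sorted (s : List Int) (hs : s.Pairwise (fun a b => a ≤ b)) :
    adjNZ none s = ((s.length : Int) - (s.dedup.length : Int))
      - (if (0:Int) ∈ s then (s.count 0 : Int) - 1 else 0) := by
  induction s with
  | nil => simp [adjNZ]
  | cons x t ih =>
    rw [adjNZ_none_cons]
    cases t with
    | nil =>
      by_cases hx : x = 0
      · subst hx; simp [adjNZ]
      · simp [adjNZ, hx, Ne.symm hx]
    | cons y t' =>
      have hst : (y :: t').Pairwise (fun a b => a ≤ b) := (List.pairwise_cons.mp hs).2
      have iht := ih hst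
      rw [adjNZ_none_cons] at iht
      show (if some y = some x ∧ y ≠ 0 then 1 else 0) + adjNZ (some y) t' = _
      by_cases hxy : x = y
      · have hmem : x ∈ y :: t' := by rw [hxy]; exact List.mem_cons_self
        rw [List.dedup_cons_of_mem hmem]
        by_cases hy0 : y = 0
        · have h0m : (0:Int) ∈ y :: t' := by rw [← hy0]; exact List.mem_cons_self
          have h0m' : (0:Int) ∈ x :: y :: t' := List.mem_cons_of_mem _ h0m
          rw [if_neg (by simp [hxy, hy0]), iht, if_pos h0m, if_pos h0m']
          have hc : ((x :: y :: t').count 0 : Int) = ((y :: t').count 0 : Int) + 1 := by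
            simp [List.count_cons, hxy, hy0]
          rw [hc]
          simp only [List.length_cons]
          push_cast; ring
        · rw [if_pos ⟨by rw [hxy], hy0⟩, iht]
          have hm0 : ((0:Int) ∈ x :: y :: t') ↔ ((0:Int) ∈ y :: t') := by
            rw [List.mem_cons]
            constructor
            · rintro (h | h)
              · exact absurd h.symm (by rw [hxy]; exact hy0)
              · exact h
            · exact Or.inr
          have hc : ((x :: y :: t').count 0 : Int) = ((y :: t').count 0 : Int) := by
            simp [List.count_cons, hxy, hy0]
          simp only [hm0, hc]
          simp only [List.length_cons]
          split_ifs <;> push_cast <;> ring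
      · have hnm : x ∉ y :: t' := notMem_of_sorted_head x y t' hs hxy
        rw [List.dedup_cons_of_notMem hnm]
        rw [if_neg (by rintro ⟨h, -⟩; exact hxy (Option.some.inj h).symm), iht]
        by_cases hx0 : x = 0
        · have h0nm : (0:Int) ∉ y :: t' := by rw [← hx0]; exact hnm
          have h0m : (0:Int) ∈ x :: y :: t' := by rw [← hx0]; exact List.mem_cons_self
          rw [if_neg h0nm, if_pos h0m]
          have hc : ((x :: y :: t').count 0 : Int) = 1 := by
            have : (y :: t').count 0 = 0 := List.count_eq_zero.mpr h0nm
            simp [List.count_cons, hx0, this]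
          rw [hc]
          simp only [List.length_cons]
          push_cast; ring
        · have hm0 : ((0:Int) ∈ x :: y :: t') ↔ ((0:Int) ∈ y :: t') := by
            rw [List.mem_cons]
            constructor
            · rintro (h | h)
              · exact absurd h.symm hx0
              · exact h
            · exact Or.inr
          have hc : ((x :: y :: t').count 0 : Int) = ((y :: t').count 0 : Int) := by
            simp [List.count_cons, hx0]
          simp only [hm0, hc]
          simp only [List.length_cons]
          split_ifs <;> push_cast <;> ring

theorem adjAny_sorted (s : List Int) (hs : s.Pairwise (fun a b => a ≤ b)) :
    adjAny none s = decide (s.dedup.length < s.length) := by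
  induction s with
  | nil => simp [adjAny]
  | cons x t ih =>
    rw [adjAny_none_cons]
    cases t with
    | nil => simp [adjAny, List.dedup_cons_of_notMem]
    | cons y t' =>
      have hst : (y :: t').Pairwise (fun a b => a ≤ b) := (List.pairwise_cons.mp hs).2
      have iht := ih hst
      rw [adjAny_none_cons] at iht
      show (decide (some y = some x) || adjAny (some y) t') = _
      have hded := (List.dedup_sublist (y :: t')).length_le
      by_cases hxy : x = y
      · rw [List.dedup_cons_of_mem (by rw [hxy]; exact List.mem_cons_self)]
        simp only [List.length_cons] at hded
        simp [hxy]
        omega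
      · have hnm : x ∉ y :: t' := notMem_of_sorted_head x y t' hs hxy
        rw [List.dedup_cons_of_notMem hnm]
        rw [show decide (some y = some x) = false from by simp [Ne.symm hxy]]
        simp only [Bool.false_or, List.length_cons, iht]
        simp only [decide_eq_decide]
        omega

-- foldl max bounds
theorem foldl_max_le (l : List Int) (i b : Int) (hi : i ≤ b) (h : ∀ x ∈ l, x ≤ b) :
    l.foldl max i ≤ b := by
  induction l generalizing i with
  | nil => exact hi
  | cons a t ih =>
    exact ih _ (max_le hi (h a List.mem_cons_self)) (fun x hx => h x (List.mem_cons_of_mem _ hx))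

theorem init_le_foldl_max (l : List Int) (i : Int) : i ≤ l.foldl max i := by
  induction l generalizing i with
  | nil => exact le_refl i
  | cons a t ih => exact le_trans (le_max_left i a) (ih _)

theorem mem_le_foldl_max (l : List Int) (i x : Int) (hx : x ∈ l) : x ≤ l.foldl max i := by
  induction l generalizing i with
  | nil => simp at hx
  | cons a t ih =>
    rcases List.mem_cons.mp hx with h | h
    · subst h
      exact le_trans (le_max_right i x) (init_le_foldl_max t _)
    · exact ih _ h

theorem foldl_max_eq (l : List Int) (L : Int) (hL : L ∈ l) (hub : ∀ x ∈ l, x ≤ L) :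
    l.foldl max 0 = max L 0 := by
  refine le_antisymm (foldl_max_le l 0 (max L 0) (le_max_right L 0)
    (fun x hx => le_trans (hub x hx) (le_max_left L 0))) ?_
  exact max_le (mem_le_foldl_max l 0 L hL) (init_le_foldl_max l 0)

theorem pairwise_le_getLast (s : List Int) (h : s.Pairwise (fun a b => a ≤ b)) (hne : s ≠ []) :
    ∀ x ∈ s, x ≤ s.getLast hne := by
  induction s with
  | nil => simp at hne
  | cons a t ih =>
    rcases List.pairwise_cons.mp h with ⟨ha, ht⟩
    intro x hx
    cases t with
    | nil =>
      simp at hx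
      simp [hx]
    | cons b t' =>
      rw [List.getLast_cons (by simp)]
      have hlast : (b :: t').getLast (by simp) ∈ b :: t' := List.getLast_mem _
      rcases List.mem_cons.mp hx with h' | h'
      · exact h' ▸ ha _ hlast
      · exact ih ht (by simp) x h'

theorem len2_alt_eq_nf (arr : List Int) : len2_alt arr = nf arr := by
  unfold len2_alt nf
  dsimp only
  have hperm : (PySem.List.sorted arr (fun x => x) false).Perm arr :=
    PySem.List.sorted_perm arr (fun x => x) false
  have hpw : (PySem.List.sorted arr (fun x => x) false).Pairwise (fun a b => a ≤ b) :=
    PySem.List.sorted_pairwise arr (fun x => x)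
  set s := PySem.List.sorted arr (fun x => x) false with hsdef
  have hlen : s.length = arr.length := hperm.length_eq
  have hgfold : s.foldl (fun g x => ((Int.gcd g x : Nat) : Int)) 0 = ((natG arr 0 : Nat) : Int) := by
    have := intG_eq_natG s 0
    simpa [natG_perm s arr hperm 0] using this
  rw [hgfold]
  have hiff : ((natG arr 0 : Nat) : Int) = 0 ↔ (∀ x ∈ arr, x = 0) := by
    rw [Int.natCast_eq_zero]; exact natG_eq_zero_iff arr
  by_cases hall : ∀ x ∈ arr, x = 0
  · rw [if_pos (hiff.mpr hall), if_pos hall, hlen]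
  · rw [if_neg (fun h => hall (hiff.mp h)), if_neg hall]
    have hsne : s ≠ [] := by
      intro h
      exact hall (fun x hx => absurd (hperm.mem_iff.mpr hx) (by simp [h]))
    -- s[-1] is the maximum element
    have hget : (PySem.List.pyGet? s (-1)).getD 0 = s.getLast hsne := by
      rw [PySem.List.pyGet?_neg_one, List.getLast?_eq_getLast hsne]
      rfl
    have hmax : arr.foldl (fun a b => max a b) 0 = max ((PySem.List.pyGet? s (-1)).getD 0) 0 := by
      rw [hget]
      exact foldl_max_eq arr (s.getLast hsne)
        (hperm.mem_iff.mp (List.getLast_mem hsne))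
        (fun x hx => pairwise_le_getLast s hpw hsne x (hperm.mem_iff.mpr hx))
    rw [← hmax, scan_unroll]
    dsimp only
    rw [adjNZ_sorted s hpw, adjAny_sorted s hpw]
    have hcount : ((s.count 0 : Nat) : Int) = ((arr.count 0 : Nat) : Int) :=
      Nat.cast_inj.mpr (hperm.count_eq 0)
    have hmem0 : ((0:Int) ∈ s) ↔ ((0:Int) ∈ arr) := hperm.mem_iff
    have hdedup : s.dedup.length = (PySem.Set.ofList arr).length := by
      rw [(hperm.dedup).length_eq, (setOfList_perm_dedup arr).length_eq]
    simp only [zero_add, Bool.false_or, hcount, hdedup, hmem0, hlen, decide_eq_true_eq]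
    generalize PySem.Int.floordiv (arr.foldl (fun a b => max a b) 0) ((natG arr 0 : Nat) : Int) = F
    by_cases hz : (0:Int) ∈ arr
    · have hcpos : 0 < arr.count 0 := List.count_pos_iff.mpr hz
      simp only [if_pos hz]
      split_ifs <;> push_cast at * <;> omega
    · have hc0 : arr.count 0 = 0 := List.count_eq_zero.mpr hz
      simp only [if_neg hz]
      split_ifs <;> push_cast at * <;> omega

-- ===== VERDICT (by name: the statement is the Claim_ definition above) =====
theorem len2_spec : Claim_equal_len2 := by
  intro arr _
  unfold Spec_len2
  rw [len2_eq_nf, len2_alt_eq_nf]
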